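-- pv_equiv track=rewrite | github.com/jackl39/TSIT_SpideyDrone | scripts/TurtleBot.py | Adress2Coords
-- ===== SOURCE A (Python) =====
-- def Adress2Coords(val):
--     mydic = {
--         (0, 0): "First and First",
--         (0, 1): "First and Second",
--         (0, 2): "First and Third",
--         (1, 0): "Second and First",
--         (1, 1): "Second and Second",
--         (1, 2): "Second and Third",
--         (2, 0): "Third and First",
--         (2, 1): "Third and Second",
--         (2, 2): "Third and Third"
--     }
--
--     for key, value in mydic.items():
--         if val == value:
--             return key
-- ===== SOURCE B (Python) =====
-- def Adress2Coords(val):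
--     # Parse the address instead of scanning a coord->string table:
--     # split at ' and ' via partition, map each word through a 3-entry dict.
--     idx = {'First': 0, 'Second': 1, 'Third': 2}
--     try:
--         first, _, second = val.partition(' and ')
--         return (idx[first], idx[second])
--     except (KeyError, AttributeError, TypeError):
--         return None
-- ===== Notes on version B (the rewrite author's own statement) =====
-- stated objective: idiomatic
-- what changed: B parses the string (partition at ' and ' plus a word-to-index dict) instead of scanning a 9-entry coordinate-to-string table for a matching value.
import Mathlib
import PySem

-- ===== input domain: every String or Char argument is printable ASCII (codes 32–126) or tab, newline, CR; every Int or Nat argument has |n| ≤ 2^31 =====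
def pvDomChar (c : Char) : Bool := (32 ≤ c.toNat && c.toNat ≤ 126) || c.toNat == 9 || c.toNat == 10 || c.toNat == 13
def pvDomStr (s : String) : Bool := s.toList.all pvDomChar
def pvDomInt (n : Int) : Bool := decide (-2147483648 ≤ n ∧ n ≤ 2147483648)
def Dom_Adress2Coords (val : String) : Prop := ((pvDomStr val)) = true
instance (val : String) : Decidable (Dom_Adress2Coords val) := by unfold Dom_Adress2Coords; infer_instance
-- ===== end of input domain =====

-- B replaces A's reverse scan of a 9-entry coord->string table by parsing the string
-- (partition at " and " plus a 3-entry word->index dict); idiomatic, not claimed faster.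

-- ===== PORT A =====
-- the dict literal (distinct keys) ported as its items list in insertion order
def pvTableA : List ((Int × Int) × String) :=
  [((0, 0), "First and First"),
   ((0, 1), "First and Second"),
   ((0, 2), "First and Third"),
   ((1, 0), "Second and First"),
   ((1, 1), "Second and Second"),
   ((1, 2), "Second and Third"),
   ((2, 0), "Third and First"),
   ((2, 1), "Third and Second"),
   ((2, 2), "Third and Third")]

-- the for-loop with early return; falling off the loop returns None
def pvLoopA (val : String) : List ((Int × Int) × String) → Option (Int × Int)
  | [] => none
  | (key, value) :: rest => if val = value then some key else pvLoopA val rest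

def Adress2Coords (val : String) : Option (Int × Int) := pvLoopA val pvTableA

-- ===== PORT B =====
def pvIdxB : PySem.Dict String Int :=
  PySem.Dict.ofList [("First", 0), ("Second", 1), ("Third", 2)]

-- val.partition(' and ') ported by hand via find + slices (exact: first occurrence of the
-- non-empty separator; no occurrence gives (val, '', '')); a failed dict lookup is the
-- caught KeyError, i.e. the none branch.
def Adress2Coords_alt (val : String) : Option (Int × Int) :=
  let i := PySem.Str.find val " and "
  let first := if i = -1 then val else PySem.Str.slice val none (some i)
  let second := if i = -1 then "" else PySem.Str.slice val (some (i + 5)) none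
  match pvIdxB.get? first, pvIdxB.get? second with
  | some x, some y => some (x, y)
  | _, _ => none

-- ===== PRECONDITION & SPEC =====
def Spec_Adress2Coords (val : String) (out : Option (Int × Int)) : Prop := out = Adress2Coords_alt val
instance (val : String) (out : Option (Int × Int)) : Decidable (Spec_Adress2Coords val out) := by unfold Spec_Adress2Coords; infer_instance

-- ===== CLAIM (what is proved, stated in full; the proofs are below) =====
def Claim_equal_Adress2Coords : Prop := ∀ (val : String), Dom_Adress2Coords val → Spec_Adress2Coords val (Adress2Coords val)

-- ===== LEMMAS AND PROOFS =====

-- a successful lookup in B's 3-entry dict forces the word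
theorem pvIdxB_get?_some {w : String} {x : Int} (h : pvIdxB.get? w = some x) :
    w = "First" ∨ w = "Second" ∨ w = "Third" := by
  by_cases h1 : w = "First"; · exact Or.inl h1
  by_cases h2 : w = "Second"; · exact Or.inr (Or.inl h2)
  by_cases h3 : w = "Third"; · exact Or.inr (Or.inr h3)
  exfalso
  have hd : pvIdxB = PySem.Dict.mk [("First", 0), ("Second", 1), ("Third", 2)] := by decide
  rw [hd] at h
  simp only [PySem.Dict.get?_mk_cons, beq_iff_eq] at h
  split_ifs at h with hA hB hC
  · exact h1 hA.symm
  · exact h2 hB.symm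
  · exact h3 hC.symm
  · simp [PySem.Dict.get?] at h

-- characterisation of a hit: the parsed pieces reassemble the whole string
theorem pv_split_at_find (cs : List Char) (h0 : 0 ≤ PySem.Chars.find cs (" and ".toList)) :
    cs = cs.take (PySem.Chars.find cs (" and ".toList)).toNat ++ " and ".toList ++
         cs.drop ((PySem.Chars.find cs (" and ".toList)).toNat + 5) := by
  obtain ⟨hpre, -⟩ := PySem.Chars.find_spec (s := cs) (sub := " and ".toList) h0
  obtain ⟨t, ht⟩ := hpre
  have hdrop : cs.drop ((PySem.Chars.find cs (" and ".toList)).toNat + 5) = t := by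
    rw [← List.drop_drop, ← ht]
    simp
  calc cs = cs.take (PySem.Chars.find cs (" and ".toList)).toNat
            ++ cs.drop (PySem.Chars.find cs (" and ".toList)).toNat := by
            rw [List.take_append_drop]
    _ = _ := by rw [← ht, hdrop, List.append_assoc]

theorem pv_pointwise (val : String) : Adress2Coords val = Adress2Coords_alt val := by
  by_cases hv : val = "First and First" ∨ val = "First and Second" ∨ val = "First and Third" ∨
      val = "Second and First" ∨ val = "Second and Second" ∨ val = "Second and Third" ∨
      val = "Third and First" ∨ val = "Third and Second" ∨ val = "Third and Third"
  · rcases hv with h|h|h|h|h|h|h|h|h <;> subst h <;> decide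
  · push Not at hv
    obtain ⟨h1, h2, h3, h4, h5, h6, h7, h8, h9⟩ := hv
    have hA : Adress2Coords val = none := by
      simp [Adress2Coords, pvTableA, pvLoopA, h1, h2, h3, h4, h5, h6, h7, h8, h9]
    have hB : Adress2Coords_alt val = none := by
      unfold Adress2Coords_alt
      rcases hf : pvIdxB.get? (if PySem.Str.find val " and " = -1 then val
          else PySem.Str.slice val none (some (PySem.Str.find val " and "))) with _ | x
      · simp at hf; simp [hf]
      rcases hs : pvIdxB.get? (if PySem.Str.find val " and " = -1 then ""
          else PySem.Str.slice val (some (PySem.Str.find val " and " + 5)) none) with _ | y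
      · simp at hf hs; simp [hf, hs]
      exfalso
      by_cases hi : PySem.Str.find val " and " = -1
      · rw [if_pos hi] at hs
        have hemp : pvIdxB.get? ("" : String) = none := by decide
        rw [hemp] at hs
        simp at hs
      rw [if_neg hi] at hf hs
      have hfind : PySem.Str.find val " and " = PySem.Chars.find val.toList (" and ".toList) := by
        simp
      rw [hfind] at hf hs hi
      have h0 : (0 : Int) ≤ PySem.Chars.find val.toList (" and ".toList) := by
        have := PySem.Chars.neg_one_le_find (s := val.toList) (sub := " and ".toList)
        omega
      have h05 : (0 : Int) ≤ PySem.Chars.find val.toList (" and ".toList) + 5 := by omega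
      have htn : (PySem.Chars.find val.toList (" and ".toList) + 5).toNat
          = (PySem.Chars.find val.toList (" and ".toList)).toNat + 5 := by omega
      have hfirst : (PySem.Str.slice val none (some (PySem.Chars.find val.toList (" and ".toList)))).toList
          = val.toList.take (PySem.Chars.find val.toList (" and ".toList)).toNat := by
        rw [PySem.Str.toList_slice, PySem.Chars.slice_eq_listSlice, PySem.List.slice_to _ h0]
      have hsecond : (PySem.Str.slice val (some (PySem.Chars.find val.toList (" and ".toList) + 5)) none).toList
          = val.toList.drop ((PySem.Chars.find val.toList (" and ".toList)).toNat + 5) := by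
        rw [PySem.Str.toList_slice, PySem.Chars.slice_eq_listSlice, PySem.List.slice_from _ h05, htn]
      have hjoin := pv_split_at_find val.toList h0
      rcases pvIdxB_get?_some hf with hw1|hw1|hw1 <;>
        rcases pvIdxB_get?_some hs with hw2|hw2|hw2 <;>
        rw [← hfirst, ← hsecond, congrArg String.toList hw1, congrArg String.toList hw2] at hjoin <;>
        [exact h1 (String.toList_inj.mp (hjoin.trans (by decide)));
         exact h2 (String.toList_inj.mp (hjoin.trans (by decide)));
         exact h3 (String.toList_inj.mp (hjoin.trans (by decide)));
         exact h4 (String.toList_inj.mp (hjoin.trans (by decide)));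
         exact h5 (String.toList_inj.mp (hjoin.trans (by decide)));
         exact h6 (String.toList_inj.mp (hjoin.trans (by decide)));
         exact h7 (String.toList_inj.mp (hjoin.trans (by decide)));
         exact h8 (String.toList_inj.mp (hjoin.trans (by decide)));
         exact h9 (String.toList_inj.mp (hjoin.trans (by decide)))]
    rw [hA, hB]

-- ===== VERDICT (by name: the statement is the Claim_ definition above) =====
theorem Adress2Coords_spec : Claim_equal_Adress2Coords := by
  intro val _
  unfold Spec_Adress2Coords
  exact pv_pointwise val
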